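-- pv_equiv track=rewrite | github.com/iZelikov/beegeek-algo | task_6_4.py | steps_to_max
-- ===== SOURCE A (Python) =====
-- def steps_to_max(nums):
--     mx = nums[0]
--     steps = 0
--     for i, v in enumerate(nums):
--         if v > mx:
--             steps += (v - mx) * i
--             mx = v
--         elif v < mx:
--             steps += mx - v
--     return steps
-- ===== SOURCE B (Python) =====
-- def steps_to_max(nums):
--     return len(nums) * max(nums) - sum(nums)
-- ===== Notes on version B (the rewrite author's own statement) =====
-- stated objective: simpler
-- what changed: Replaces the stateful running-max/accumulator loop by the closed form len(nums)*max(nums) - sum(nums), which equals A's result by a telescoping argument.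
import Mathlib
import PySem

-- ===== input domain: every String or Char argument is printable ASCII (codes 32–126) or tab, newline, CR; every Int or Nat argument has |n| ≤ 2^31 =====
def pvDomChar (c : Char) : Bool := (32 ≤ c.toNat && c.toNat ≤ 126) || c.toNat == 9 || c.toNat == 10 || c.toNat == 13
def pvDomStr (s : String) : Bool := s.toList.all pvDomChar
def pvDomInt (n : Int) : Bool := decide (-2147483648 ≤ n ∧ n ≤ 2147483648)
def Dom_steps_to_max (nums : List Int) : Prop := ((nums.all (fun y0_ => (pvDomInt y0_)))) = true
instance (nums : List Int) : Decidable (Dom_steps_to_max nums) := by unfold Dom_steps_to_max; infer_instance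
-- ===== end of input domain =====

-- B replaces A's running-max accumulator loop by the closed form len(nums)*max(nums) - sum(nums)
-- (equal by telescoping); simpler, same asymptotic cost. Pre_ excludes [] where both raise.


-- ===== PORT A =====
-- nums[0] on the empty list raises IndexError; Pre_ excludes it, so the .getD 0 default is never claimed
def steps_to_max (nums : List Int) : Int :=
  let mx0 := (PySem.List.pyGet? nums 0).getD 0
  ((PySem.List.enumerate nums 0).foldl
    (fun (st : Int × Int) iv =>
      if iv.2 > st.1 then (iv.2, st.2 + (iv.2 - st.1) * iv.1)
      else if iv.2 < st.1 then (st.1, st.2 + (st.1 - iv.2))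
      else st)
    (mx0, 0)).2

-- ===== PORT B =====
-- max(nums) on the empty list raises ValueError; Pre_ excludes it, so the .getD 0 default is never claimed
def steps_to_max_alt (nums : List Int) : Int :=
  (nums.length : Int) * ((PySem.List.max? nums (fun y => y)).getD 0) - nums.sum

-- ===== PRECONDITION & SPEC =====
-- Pre_ excludes exactly the empty list, where A raises IndexError (and B raises ValueError).
def Pre_steps_to_max (nums : List Int) : Prop := nums ≠ []
instance (nums : List Int) : Decidable (Pre_steps_to_max nums) := by unfold Pre_steps_to_max; infer_instance
def pvWitness_steps_to_max : List Int := [3, 1, 4, 1, 5]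

def Spec_steps_to_max (nums : List Int) (out : Int) : Prop := out = steps_to_max_alt nums
instance (nums : List Int) (out : Int) : Decidable (Spec_steps_to_max nums out) := by unfold Spec_steps_to_max; infer_instance

-- ===== CLAIM (what is proved, stated in full; the proofs are below) =====
def Claim_equal_steps_to_max : Prop := ∀ (nums : List Int), Dom_steps_to_max nums → Pre_steps_to_max nums → Spec_steps_to_max nums (steps_to_max nums)

-- ===== LEMMAS AND PROOFS =====

-- The loop invariant: running A's body over `enumerate l s` from state (mx, steps) yields
-- running max `l.foldl max mx` and steps grown by the telescoped closed form.
theorem steps_loop_closed (l : List Int) : ∀ (s mx steps : Int),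
    ((PySem.List.enumerate l s).foldl
      (fun (st : Int × Int) iv =>
        if iv.2 > st.1 then (iv.2, st.2 + (iv.2 - st.1) * iv.1)
        else if iv.2 < st.1 then (st.1, st.2 + (st.1 - iv.2))
        else st)
      (mx, steps))
    = (l.foldl max mx, steps + (s + l.length) * (l.foldl max mx) - s * mx - l.sum) := by
  induction l with
  | nil =>
    intro s mx steps
    simp only [PySem.List.enumerate_nil, List.foldl_nil, List.length_nil, List.sum_nil,
      Prod.mk.injEq]
    exact ⟨trivial, by push_cast; ring⟩
  | cons v t ih =>
    intro s mx steps
    rw [PySem.List.enumerate_cons]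
    simp only [List.foldl_cons]
    rcases lt_trichotomy mx v with h | h | h
    · rw [if_pos (by simpa using h)]
      rw [ih (s+1) v (steps + (v - mx) * s)]
      rw [max_eq_right (le_of_lt h)]
      simp only [List.sum_cons, List.length_cons, Prod.mk.injEq]
      exact ⟨trivial, by push_cast; ring⟩
    · subst h
      rw [if_neg (by simp), if_neg (by simp)]
      rw [ih (s+1) mx steps]
      rw [max_self]
      simp only [List.sum_cons, List.length_cons, Prod.mk.injEq]
      exact ⟨trivial, by push_cast; ring⟩
    · rw [if_neg (by simp [not_lt.mpr (le_of_lt h)]), if_pos (by simpa using h)]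
      rw [ih (s+1) mx (steps + (mx - v))]
      rw [max_eq_left (le_of_lt h)]
      simp only [List.sum_cons, List.length_cons, Prod.mk.injEq]
      exact ⟨trivial, by push_cast; ring⟩

-- ===== VERDICT (by name: the statement is the Claim_ definition above) =====
theorem steps_to_max_spec : Claim_equal_steps_to_max := by
  intro nums _ hpre
  unfold Spec_steps_to_max steps_to_max steps_to_max_alt
  match nums, hpre with
  | h :: t, _ =>
    have hget : (PySem.List.pyGet? (h :: t) (0 : Int)).getD 0 = h := by
      simp [PySem.List.pyGet?, PySem.List.pyIdx?]
    rw [PySem.List.max?_id_cons]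
    show ((PySem.List.enumerate (h :: t) 0).foldl _ ((PySem.List.pyGet? (h :: t) (0 : Int)).getD 0, 0)).2 = _
    rw [hget, steps_loop_closed (h :: t) 0 h 0]
    simp only [List.foldl_cons, max_self, List.sum_cons, List.length_cons, Option.getD_some]
    push_cast
    ring
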